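-- pv_equiv track=rewrite | github.com/josehu07/foreactor | realapps/leveldb/scripts/prepare.py | get_full_stat_section
-- ===== SOURCE A (Python) =====
-- def get_full_stat_section(output):
--     lines = output.split('\n')
--     stat_lines = []
--     in_stat_section = False
--
--     for line in lines:
--         if line.startswith("Num files at level --"):
--             in_stat_section = True
--         if in_stat_section:
--             stat_lines.append(line.strip())
--
--     return '\n'.join(stat_lines)
-- ===== SOURCE B (Python) =====
-- def get_full_stat_section(output):
--     lines = output.split('\n')
--     idx = next((i for i, l in enumerate(lines)
--                 if l.startswith("Num files at level --")), None)
--     if idx is None: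
--         return ''
--     return '\n'.join(l.strip() for l in lines[idx:])
-- ===== Notes on version B (the rewrite author's own statement) =====
-- stated objective: simpler
-- what changed: Replaces the interleaved boolean-flag accumulation with an explicit find-first-marker-index step followed by a slice-and-strip join.
import Mathlib
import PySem

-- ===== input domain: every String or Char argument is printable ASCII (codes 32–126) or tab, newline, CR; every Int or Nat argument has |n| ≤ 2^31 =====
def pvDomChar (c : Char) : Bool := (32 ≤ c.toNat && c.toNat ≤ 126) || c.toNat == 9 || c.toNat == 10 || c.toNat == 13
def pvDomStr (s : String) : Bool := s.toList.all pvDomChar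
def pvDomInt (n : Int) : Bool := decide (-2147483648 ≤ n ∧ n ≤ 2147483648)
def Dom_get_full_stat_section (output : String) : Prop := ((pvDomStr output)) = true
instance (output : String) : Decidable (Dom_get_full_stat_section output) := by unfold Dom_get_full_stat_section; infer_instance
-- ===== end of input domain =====

-- ===== PORT A =====
-- A's header line: flag-based single pass, strip-and-collect once the marker line is seen.
def get_full_stat_section (output : String) : String :=
  let lines := (PySem.Str.split? output "\n").getD []
  let st := lines.foldl
    (fun (acc : List String × Bool) line =>
      let ins := if PySem.Str.startswith line "Num files at level --" then true else acc.2
      if ins then (acc.1 ++ [PySem.Str.strip line], ins) else (acc.1, ins))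
    ([], false)
  PySem.Str.join "\n" st.1

-- ===== PORT B =====
def get_full_stat_section_alt (output : String) : String :=
  let lines := (PySem.Str.split? output "\n").getD []
  match lines.findIdx? (fun l => PySem.Str.startswith l "Num files at level --") with
  | none => ""
  | some i => PySem.Str.join "\n" ((lines.drop i).map PySem.Str.strip)

-- ===== PRECONDITION & SPEC =====
def Spec_get_full_stat_section (output : String) (out : String) : Prop := out = get_full_stat_section_alt output
instance (output : String) (out : String) : Decidable (Spec_get_full_stat_section output out) := by unfold Spec_get_full_stat_section; infer_instance

-- ===== CLAIM (what is proved, stated in full; the proofs are below) =====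
def Claim_equal_get_full_stat_section : Prop := ∀ (output : String), Dom_get_full_stat_section output → Spec_get_full_stat_section output (get_full_stat_section output)

-- ===== LEMMAS AND PROOFS =====

-- step of A's fold, abstracted over the predicate and the per-line transform
def pvStep (p : String → Bool) (f : String → String)
    (acc : List String × Bool) (line : String) : List String × Bool :=
  let ins := if p line then true else acc.2
  if ins then (acc.1 ++ [f line], ins) else (acc.1, ins)

theorem pvFold_true (p : String → Bool) (f : String → String) :
    ∀ (lines : List String) (acc : List String),
      lines.foldl (pvStep p f) (acc, true) = (acc ++ lines.map f, true) := by
  intro lines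
  induction lines with
  | nil => simp
  | cons l ls ih =>
      intro acc
      rw [List.foldl_cons]
      have hstep : pvStep p f (acc, true) l = (acc ++ [f l], true) := by
        cases hpl : p l <;> simp [pvStep, hpl]
      rw [hstep, ih]
      simp

theorem pvFold_false (p : String → Bool) (f : String → String) :
    ∀ (lines : List String) (acc : List String),
      lines.foldl (pvStep p f) (acc, false) =
        (acc ++ (match lines.findIdx? p with
                 | none => []
                 | some i => (lines.drop i).map f),
         (lines.findIdx? p).isSome) := by
  intro lines
  induction lines with
  | nil => simp
  | cons l ls ih =>
      intro acc
      rw [List.foldl_cons]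
      by_cases hp : p l = true
      · have hstep : pvStep p f (acc, false) l = (acc ++ [f l], true) := by
          simp [pvStep, hp]
        rw [hstep, pvFold_true, List.findIdx?_cons]
        simp [hp]
      · have hstep : pvStep p f (acc, false) l = (acc, false) := by
          simp [pvStep, hp]
        rw [hstep, ih, List.findIdx?_cons]
        simp only [hp, if_false, Bool.false_eq_true]
        cases h : ls.findIdx? p <;> simp

-- the two ports agree on any line list
theorem pvMain (lines : List String) :
    PySem.Str.join "\n" (lines.foldl
      (fun (acc : List String × Bool) line =>
        let ins := if PySem.Str.startswith line "Num files at level --" then true else acc.2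
        if ins then (acc.1 ++ [PySem.Str.strip line], ins) else (acc.1, ins))
      ([], false)).1
    = match lines.findIdx? (fun l => PySem.Str.startswith l "Num files at level --") with
      | none => ""
      | some i => PySem.Str.join "\n" ((lines.drop i).map PySem.Str.strip) := by
  rw [show (fun (acc : List String × Bool) line =>
        let ins := if PySem.Str.startswith line "Num files at level --" then true else acc.2
        if ins then (acc.1 ++ [PySem.Str.strip line], ins) else (acc.1, ins))
      = pvStep (fun l => PySem.Str.startswith l "Num files at level --") PySem.Str.strip from rfl]
  rw [pvFold_false]
  cases h : lines.findIdx? (fun l => PySem.Str.startswith l "Num files at level --") with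
  | none => rfl
  | some i => simp

-- ===== VERDICT (by name: the statement is the Claim_ definition above) =====
theorem get_full_stat_section_spec : Claim_equal_get_full_stat_section := by
  intro output _
  unfold Spec_get_full_stat_section get_full_stat_section get_full_stat_section_alt
  exact pvMain ((PySem.Str.split? output "\n").getD [])
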